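-- pv_equiv track=rewrite | github.com/Jij-Inc/Qamomile | docs/api_gen/rst_converter.py | _collect_indented_block
-- ===== SOURCE A (Python) =====
-- def _get_indent(line: str) -> int:
--     """Get the indentation level of a line."""
--     return len(line) - len(line.lstrip())
--
-- def _collect_indented_block(
--     lines: list[str], start: int, directive_indent: int
-- ) -> list[str]:
--     """Collect lines that are indented more than the directive."""
--     block: list[str] = []
--     i = start
--     while i < len(lines):
--         line = lines[i]
--         if line.strip() == "":
--             # Blank lines are part of the block if followed by indented content
--             lookahead = i + 1
--             while lookahead < len(lines) and lines[lookahead].strip() == "":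
--                 lookahead += 1
--             if (
--                 lookahead < len(lines)
--                 and _get_indent(lines[lookahead]) > directive_indent
--             ):
--                 block.append(line)
--                 i += 1
--                 continue
--             break
--         if _get_indent(line) > directive_indent:
--             block.append(line)
--             i += 1
--         else:
--             break
--     return block
-- ===== SOURCE B (Python) =====
-- def _collect_indented_block(
--     lines: list[str], start: int, directive_indent: int
-- ) -> list[str]:
--     """Collect lines that are indented more than the directive.
--
--     Two staged passes instead of a lookahead walk: a backward DP pass marks
--     each position as "deep" (its next non-blank line, if any, is indented
--     more than the directive), then the block is the maximal run of deep
--     positions from start.  A non-blank line is deep iff its own indent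
--     exceeds the directive; a blank line inherits deepness from the next
--     position, which is exactly A's lookahead criterion.
--     """
--     n = len(lines)
--     deep = [False] * (n + 1)
--     for i in range(n - 1, -1, -1):
--         if lines[i].strip() == "":
--             deep[i] = deep[i + 1]
--         else:
--             deep[i] = len(lines[i]) - len(lines[i].lstrip()) > directive_indent
--     block: list[str] = []
--     i = start
--     while i < n and deep[i]:
--         block.append(lines[i])
--         i += 1
--     return block
-- ===== Notes on version B (the rewrite author's own statement) =====
-- stated objective: alternative
-- what changed: Replaces A's forward walk with per-blank-line re-lookahead by a backward dynamic-programming pass that precomputes a 'deep' flag for every position, followed by a plain take-while from start; no lookahead scan remains.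
-- outside the precondition, e.g. on _collect_indented_block(['  x', ''], -1, 0): A returns ['', '  x'], B returns []
import Mathlib
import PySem

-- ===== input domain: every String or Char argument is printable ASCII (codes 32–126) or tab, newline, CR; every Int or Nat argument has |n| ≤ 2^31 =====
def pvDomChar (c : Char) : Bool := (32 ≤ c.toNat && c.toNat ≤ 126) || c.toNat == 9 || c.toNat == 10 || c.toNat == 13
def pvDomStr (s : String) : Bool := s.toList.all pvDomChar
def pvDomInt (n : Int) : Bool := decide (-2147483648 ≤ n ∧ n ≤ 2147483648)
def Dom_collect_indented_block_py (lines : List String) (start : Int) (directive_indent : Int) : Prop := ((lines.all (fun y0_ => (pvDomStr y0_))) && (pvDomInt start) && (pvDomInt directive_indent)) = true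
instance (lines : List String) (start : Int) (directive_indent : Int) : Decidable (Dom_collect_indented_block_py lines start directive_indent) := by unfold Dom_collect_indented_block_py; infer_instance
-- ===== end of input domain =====

-- B replaces A's forward walk with per-blank-line lookahead by a backward DP pass
-- (a "deep" flag per position) followed by a plain take-while from start
-- (objective: alternative two-pass structure).
-- Both while loops are ported as structural recursion on a fuel that equals the exact
-- number of remaining loop iterations, ((len lines) - i).toNat.

-- ===== PORT A =====
-- _get_indent: len(line) - len(line.lstrip())
def pvGetIndent (line : String) : Int :=
  PySem.Str.len line - PySem.Str.len (PySem.Str.lstrip line)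

-- A's inner lookahead loop: `while lookahead < len(lines) and lines[lookahead].strip() == "": lookahead += 1`
-- (lines[lookahead] is ported as pyGetD: under Pre_ every index the loop reaches is in range)
def pvLookA (lines : List String) : Nat → Int → Int
  | 0, la => la
  | f + 1, la =>
    if la < (lines.length : Int) ∧ PySem.Str.strip (PySem.List.pyGetD lines la "") = "" then
      pvLookA lines f (la + 1)
    else la

-- A's outer while loop over (i, block)
def pvGoA (lines : List String) (d : Int) : Nat → Int → List String → List String
  | 0, _, block => block
  | fuel + 1, i, block =>
    if i < (lines.length : Int) then
      if PySem.Str.strip (PySem.List.pyGetD lines i "") = "" then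
        let la := pvLookA lines ((lines.length : Int) - (i + 1)).toNat (i + 1)
        if la < (lines.length : Int) ∧ pvGetIndent (PySem.List.pyGetD lines la "") > d then
          pvGoA lines d fuel (i + 1) (block ++ [PySem.List.pyGetD lines i ""])
        else block
      else if pvGetIndent (PySem.List.pyGetD lines i "") > d then
        pvGoA lines d fuel (i + 1) (block ++ [PySem.List.pyGetD lines i ""])
      else block
    else block

def collect_indented_block_py (lines : List String) (start : Int) (directive_indent : Int) : List String :=
  pvGoA lines directive_indent ((lines.length : Int) - start).toNat start []

-- ===== PORT B =====
-- B's backward DP pass: deep[i] for i = 0..n, built from the tail; deep[n] = False,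
-- blank lines inherit deep[i+1], non-blank lines compare their own indent.
def pvDeepList (d : Int) : List String → List Bool
  | [] => [false]
  | l :: rest =>
    let r := pvDeepList d rest
    (if PySem.Str.strip l = "" then r.headD false else decide (pvGetIndent l > d)) :: r

-- B's take-while loop: `while i < n and deep[i]: block.append(lines[i]); i += 1`
def pvGoB (lines : List String) (deep : List Bool) : Nat → Int → List String → List String
  | 0, _, block => block
  | fuel + 1, i, block =>
    if i < (lines.length : Int) ∧ PySem.List.pyGetD deep i false = true then
      pvGoB lines deep fuel (i + 1) (block ++ [PySem.List.pyGetD lines i ""])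
    else block

def collect_indented_block_py_alt (lines : List String) (start : Int) (directive_indent : Int) : List String :=
  pvGoB lines (pvDeepList directive_indent lines) ((lines.length : Int) - start).toNat start []

-- ===== PRECONDITION & SPEC =====
-- Pre_ excludes negative start: a start below -len(lines) makes A raise IndexError, and a
-- start in [-len(lines), 0) is outside the natural line-index domain — A's value there is an
-- accident of Python's negative-index wraparound (its blank-run lookahead wraps from -1 to 0).
def Pre_collect_indented_block_py (lines : List String) (start : Int) (directive_indent : Int) : Prop :=
  0 ≤ start
instance (lines : List String) (start : Int) (directive_indent : Int) : Decidable (Pre_collect_indented_block_py lines start directive_indent) := by unfold Pre_collect_indented_block_py; infer_instance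

def pvWitness_collect_indented_block_py : List String × Int × Int := (["  a", "", "  b", "c"], 0, 0)

def Spec_collect_indented_block_py (lines : List String) (start : Int) (directive_indent : Int) (out : List String) : Prop := out = collect_indented_block_py_alt lines start directive_indent
instance (lines : List String) (start : Int) (directive_indent : Int) (out : List String) : Decidable (Spec_collect_indented_block_py lines start directive_indent out) := by unfold Spec_collect_indented_block_py; infer_instance

-- ===== CLAIM (what is proved, stated in full; the proofs are below) =====
def Claim_equal_collect_indented_block_py : Prop := ∀ (lines : List String) (start : Int) (directive_indent : Int), Dom_collect_indented_block_py lines start directive_indent → Pre_collect_indented_block_py lines start directive_indent → Spec_collect_indented_block_py lines start directive_indent (collect_indented_block_py lines start directive_indent)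

-- ===== LEMMAS AND PROOFS =====

theorem pvDeepList_length (d : Int) (lines : List String) :
    (pvDeepList d lines).length = lines.length + 1 := by
  induction lines with
  | nil => rfl
  | cons l rest ih => simp [pvDeepList, ih]

-- deep[n] = false
theorem pvDeepList_last (d : Int) (lines : List String) :
    (pvDeepList d lines).getD lines.length false = false := by
  induction lines with
  | nil => rfl
  | cons l rest ih => simpa [pvDeepList] using ih

-- one-step characterisation of deep[i] for i < n
theorem pvDeepList_step (d : Int) (lines : List String) : ∀ (i : Nat), i < lines.length →
    (pvDeepList d lines).getD i false =
      (if PySem.Str.strip (lines.getD i "") = "" then (pvDeepList d lines).getD (i + 1) false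
       else decide (pvGetIndent (lines.getD i "") > d)) := by
  induction lines with
  | nil => intro i hi; simp at hi
  | cons l rest ih =>
    intro i hi
    cases i with
    | zero =>
      simp only [pvDeepList, List.getD_cons_zero, List.getD_cons_succ]
      by_cases hb : PySem.Str.strip l = ""
      · simp only [if_pos hb]
        cases h : pvDeepList d rest with
        | nil =>
          have := pvDeepList_length d rest; rw [h] at this; simp at this
        | cons b bs => simp
      · simp [if_neg hb]
    | succ i =>
      simp only [pvDeepList, List.getD_cons_succ]
      exact ih i (by simpa using hi)

-- deep[i] is exactly A's lookahead condition at i (k = remaining length)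
theorem pvDeep_eq_lookA (d : Int) (lines : List String) : ∀ (k i : Nat), i + k = lines.length →
    (pvDeepList d lines).getD i false =
      decide (pvLookA lines k (i : Int) < (lines.length : Int) ∧
        pvGetIndent (PySem.List.pyGetD lines (pvLookA lines k (i : Int)) "") > d) := by
  intro k
  induction k with
  | zero =>
    intro i hi
    have h0 : i = lines.length := by omega
    subst h0
    rw [pvDeepList_last]
    simp [pvLookA]
  | succ k ih =>
    intro i hi
    have hiN : i < lines.length := by omega
    have hilt : (i : Int) < (lines.length : Int) := by exact_mod_cast hiN
    rw [pvDeepList_step d lines i hiN]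
    by_cases hb : PySem.Str.strip (lines.getD i "") = ""
    · rw [if_pos hb]
      have hb' : PySem.Str.strip (PySem.List.pyGetD lines (i : Int) "") = "" := by
        rwa [PySem.List.pyGetD_natCast]
      have hla : pvLookA lines (k + 1) (i : Int) = pvLookA lines k ((i + 1 : Nat) : Int) := by
        simp only [pvLookA, if_pos (And.intro hilt hb')]
        norm_num
      rw [hla]
      exact ih (i + 1) (by omega)
    · rw [if_neg hb]
      have hb' : ¬ PySem.Str.strip (PySem.List.pyGetD lines (i : Int) "") = "" := by
        rwa [PySem.List.pyGetD_natCast]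
      have hla : pvLookA lines (k + 1) (i : Int) = (i : Int) := by
        simp only [pvLookA]
        rw [if_neg (by intro h; exact hb' h.2)]
      rw [hla, PySem.List.pyGetD_natCast]
      simp [hilt]

-- main loop equivalence: with any common fuel, A's walk equals B's take-while over deep
theorem pvGo_eq (lines : List String) (d : Int) : ∀ (f : Nat) (i : Int) (block : List String),
    0 ≤ i →
    pvGoA lines d f i block = pvGoB lines (pvDeepList d lines) f i block := by
  intro f
  induction f with
  | zero => intro i block _; rfl
  | succ f ih =>
    intro i block h0
    by_cases hi : i < (lines.length : Int)
    · obtain ⟨iN, rfl⟩ : ∃ iN : Nat, i = (iN : Int) := ⟨i.toNat, by omega⟩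
      have hiN : iN < lines.length := by exact_mod_cast hi
      have hdeep := pvDeep_eq_lookA d lines (lines.length - iN) iN (by omega)
      have hdeep' : PySem.List.pyGetD (pvDeepList d lines) (iN : Int) false =
          decide (pvLookA lines (lines.length - iN) (iN : Int) < (lines.length : Int) ∧
            pvGetIndent (PySem.List.pyGetD lines (pvLookA lines (lines.length - iN) (iN : Int)) "") > d) := by
        rw [PySem.List.pyGetD_natCast]; exact hdeep
      by_cases hb : PySem.Str.strip (PySem.List.pyGetD lines (iN : Int) "") = ""
      · -- blank line: A consults its lookahead, B consults deep[i]; they coincide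
        have hk : lines.length - iN = (((lines.length : Int) - ((iN : Int) + 1)).toNat) + 1 := by omega
        have hla : pvLookA lines (lines.length - iN) (iN : Int) =
            pvLookA lines (((lines.length : Int) - ((iN : Int) + 1)).toNat) ((iN : Int) + 1) := by
          rw [hk]; simp only [pvLookA, if_pos (And.intro hi hb)]
        set la := pvLookA lines (((lines.length : Int) - ((iN : Int) + 1)).toNat) ((iN : Int) + 1) with hladef
        rw [hla] at hdeep'
        by_cases hc : la < (lines.length : Int) ∧ pvGetIndent (PySem.List.pyGetD lines la "") > d
        · have hdt : PySem.List.pyGetD (pvDeepList d lines) (iN : Int) false = true := by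
            rw [hdeep']; exact decide_eq_true hc
          conv_lhs => rw [pvGoA]
          rw [if_pos hi, if_pos hb]
          simp only [← hladef]
          rw [if_pos hc]
          conv_rhs => rw [pvGoB]
          rw [if_pos (And.intro hi hdt)]
          exact ih _ _ (by omega)
        · have hdt : PySem.List.pyGetD (pvDeepList d lines) (iN : Int) false = false := by
            rw [hdeep']; exact decide_eq_false hc
          conv_lhs => rw [pvGoA]
          rw [if_pos hi, if_pos hb]
          simp only [← hladef]
          rw [if_neg hc]
          conv_rhs => rw [pvGoB]
          rw [if_neg (by intro h; rw [hdt] at h; exact Bool.false_ne_true h.2)]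
      · -- non-blank line: A compares the indent, deep[i] is that comparison
        have hla : pvLookA lines (lines.length - iN) (iN : Int) = (iN : Int) := by
          have hk : lines.length - iN = (lines.length - iN - 1) + 1 := by omega
          rw [hk]
          simp only [pvLookA]
          rw [if_neg (by intro h; exact hb h.2)]
        rw [hla] at hdeep'
        by_cases hd : pvGetIndent (PySem.List.pyGetD lines (iN : Int) "") > d
        · have hdt : PySem.List.pyGetD (pvDeepList d lines) (iN : Int) false = true := by
            rw [hdeep']; exact decide_eq_true (And.intro hi hd)
          conv_lhs => rw [pvGoA]
          rw [if_pos hi, if_neg hb, if_pos hd]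
          conv_rhs => rw [pvGoB]
          rw [if_pos (And.intro hi hdt)]
          exact ih _ _ (by omega)
        · have hdt : PySem.List.pyGetD (pvDeepList d lines) (iN : Int) false = false := by
            rw [hdeep']; exact decide_eq_false (by intro h; exact hd h.2)
          conv_lhs => rw [pvGoA]
          rw [if_pos hi, if_neg hb, if_neg hd]
          conv_rhs => rw [pvGoB]
          rw [if_neg (by intro h; rw [hdt] at h; exact Bool.false_ne_true h.2)]
    · conv_lhs => rw [pvGoA]
      rw [if_neg hi]
      conv_rhs => rw [pvGoB]
      rw [if_neg (by intro h; exact hi h.1)]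

-- ===== VERDICT (by name: the statement is the Claim_ definition above) =====
theorem collect_indented_block_py_spec : Claim_equal_collect_indented_block_py := by
  intro lines start directive_indent _ hpre
  unfold Spec_collect_indented_block_py collect_indented_block_py collect_indented_block_py_alt
  exact pvGo_eq lines directive_indent (((lines.length : Int) - start).toNat) start [] hpre
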